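-- pv_equiv track=rewrite | github.com/pypi-data/pypi-mirror-12 | packages/Eupompos/Eupompos-0.0.7.tar.gz/Eupompos-0.0.7/eupompos/strtools.py | add_prefix_to_lines
-- ===== SOURCE A (Python) =====
-- def add_prefix_to_lines(_lines, _prefix):
--     """
--             add_prefix_to_lines()
--             ____________________________________________________________________
--
--             Add a prefix to each line in _lines.
--
--                 e.g. :
--                         abc\ndef -> PREFIXabc\nPREFIXdef
--             ____________________________________________________________________
--
--             PARAMETERS :
--                 o _lines        : either (str)some lines with \n inside
--                                   either a list of (str)lines
--                 o _prefix       : (str)the prefix to be added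
--
--             RETURN VALUE :
--                 o (str)the expected string.
--     """
--     res = []
--
--     if isinstance(_lines, str):
--         for line in _lines.split("\n"):
--             res.append(_prefix+line)
--
--     else:
--         for line in _lines:
--             res.append(_prefix+line)
--
--     return "\n".join(res)
-- ===== SOURCE B (Python) =====
-- def add_prefix_to_lines(_lines, _prefix):
--     """Closed-form re-implementation: one string substitution instead of split/loop/join."""
--     if isinstance(_lines, str):
--         return _prefix + _lines.replace("\n", "\n" + _prefix)
--     else:
--         return "\n".join(_prefix + line for line in _lines)
-- ===== Notes on version B (the rewrite author's own statement) =====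
-- stated objective: simpler
-- what changed: The string branch's split-into-lines / prepend-in-a-loop / rejoin is replaced by the closed form _prefix + _lines.replace('\n', '\n' + _prefix): a single substitution, no intermediate list; the list branch becomes a one-line generator join.
import Mathlib
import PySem

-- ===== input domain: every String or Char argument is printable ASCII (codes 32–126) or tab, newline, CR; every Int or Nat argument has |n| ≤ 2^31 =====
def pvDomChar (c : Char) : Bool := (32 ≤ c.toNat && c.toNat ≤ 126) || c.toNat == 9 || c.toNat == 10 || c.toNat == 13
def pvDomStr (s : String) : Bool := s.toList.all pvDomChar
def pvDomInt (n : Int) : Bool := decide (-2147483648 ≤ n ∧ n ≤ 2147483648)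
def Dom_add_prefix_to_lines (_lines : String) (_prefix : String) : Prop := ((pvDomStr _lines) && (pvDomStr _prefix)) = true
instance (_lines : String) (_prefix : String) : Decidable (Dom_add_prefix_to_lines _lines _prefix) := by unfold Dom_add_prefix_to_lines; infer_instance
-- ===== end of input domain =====

-- B replaces A's split-into-lines / prepend-loop / rejoin by the closed form
-- _prefix + _lines.replace("\n", "\n" + _prefix) (objective: simpler).


-- ===== PORT A =====
-- _lines : String, so isinstance(_lines, str) is True and the list branch is unreachable.
-- res = []; for line in _lines.split("\n"): res.append(_prefix + line); return "\n".join(res)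
def add_prefix_to_lines (_lines : String) (_prefix : String) : String :=
  let res : List (List Char) :=
    (PySem.Chars.splitOn _lines.toList ['\n']).foldl
      (fun acc line => acc ++ [_prefix.toList ++ line]) []
  String.ofList (PySem.Chars.join ['\n'] res)

-- ===== PORT B =====
-- return _prefix + _lines.replace("\n", "\n" + _prefix)
def add_prefix_to_lines_alt (_lines : String) (_prefix : String) : String :=
  String.ofList (_prefix.toList ++ PySem.Chars.replace _lines.toList ['\n'] ('\n' :: _prefix.toList))

-- ===== PRECONDITION & SPEC =====
def Spec_add_prefix_to_lines (_lines : String) (_prefix : String) (out : String) : Prop := out = add_prefix_to_lines_alt _lines _prefix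
instance (_lines : String) (_prefix : String) (out : String) : Decidable (Spec_add_prefix_to_lines _lines _prefix out) := by unfold Spec_add_prefix_to_lines; infer_instance

-- ===== CLAIM (what is proved, stated in full; the proofs are below) =====
def Claim_equal_add_prefix_to_lines : Prop := ∀ (_lines : String) (_prefix : String), Dom_add_prefix_to_lines _lines _prefix → Spec_add_prefix_to_lines _lines _prefix (add_prefix_to_lines _lines _prefix)

-- ===== LEMMAS AND PROOFS =====

-- simple structural characterisation of splitting on '\n'
def pvS : List Char → List (List Char)
  | [] => [[]]
  | c :: t => if c = '\n' then [] :: pvS t else (pvS t).modifyHead (c :: ·)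

-- simple structural characterisation of replacing '\n' by '\n' :: p
def pvR (p : List Char) : List Char → List Char
  | [] => []
  | c :: t => if c = '\n' then ('\n' :: p) ++ pvR p t else c :: pvR p t

theorem pvS_ne_nil (l : List Char) : pvS l ≠ [] := by
  cases l with
  | nil => simp [pvS]
  | cons c t =>
    simp only [pvS]
    split_ifs
    · simp
    · cases h : pvS t with
      | nil => exact absurd h (pvS_ne_nil t)
      | cons a b => simp

theorem pvGoS (fuel : Nat) : ∀ (l cur : List Char) (accs : List (List Char)),
    l.length ≤ fuel →
    PySem.Chars.splitOn.go ['\n'] fuel l cur accs = accs.reverse ++ (pvS l).modifyHead (cur.reverse ++ ·) := by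
  induction fuel with
  | zero =>
    intro l cur accs h
    have hl : l = [] := List.eq_nil_of_length_eq_zero (Nat.le_zero.mp h)
    subst hl
    simp [PySem.Chars.splitOn.go, pvS]
  | succ f ih =>
    intro l cur accs h
    cases l with
    | nil => simp [PySem.Chars.splitOn.go, pvS]
    | cons c t =>
      by_cases hc : c = '\n'
      · subst hc
        have hpre : List.isPrefixOf ['\n'] ('\n' :: t) = true := by simp [List.isPrefixOf]
        rw [PySem.Chars.splitOn.go, if_pos hpre]
        simp only [List.length_cons] at h
        rw [ih _ _ _ (show (List.drop ['\n'].length ('\n' :: t)).length ≤ f by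
          simp only [List.length_singleton, List.drop_succ_cons, List.drop_zero]; omega)]
        cases hs : pvS t with
        | nil => exact absurd hs (pvS_ne_nil t)
        | cons a b =>
          rw [show pvS ('\n' :: t) = [] :: pvS t from by simp [pvS]]
          rw [hs]
          simp [List.modifyHead, hs]
      · have hpre : List.isPrefixOf ['\n'] (c :: t) = false := by
          simp only [List.isPrefixOf, Bool.and_eq_false_iff, beq_eq_false_iff_ne, ne_eq]
          exact Or.inl fun h => hc h.symm
        rw [PySem.Chars.splitOn.go, if_neg (by simp [hpre])]
        simp only [List.length_cons] at h
        rw [ih _ _ _ (by omega)]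
        simp only [pvS, if_neg hc]
        cases hs : pvS t with
        | nil => exact absurd hs (pvS_ne_nil t)
        | cons a b => simp

theorem pv_split_eq (l : List Char) : PySem.Chars.splitOn l ['\n'] = pvS l := by
  rw [PySem.Chars.splitOn, pvGoS (l.length + 1) l [] [] (by omega)]
  cases hs : pvS l with
  | nil => exact absurd hs (pvS_ne_nil l)
  | cons a b => simp

theorem pvGoR (p : List Char) (fuel : Nat) : ∀ (l acc : List Char),
    l.length ≤ fuel →
    PySem.Chars.replace.go ['\n'] ('\n' :: p) fuel l acc = acc.reverse ++ pvR p l := by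
  induction fuel with
  | zero =>
    intro l acc h
    have hl : l = [] := List.eq_nil_of_length_eq_zero (Nat.le_zero.mp h)
    subst hl
    simp [PySem.Chars.replace.go, pvR]
  | succ f ih =>
    intro l acc h
    cases l with
    | nil => simp [PySem.Chars.replace.go, pvR]
    | cons c t =>
      simp only [List.length_cons] at h
      by_cases hc : c = '\n'
      · subst hc
        have hpre : List.isPrefixOf ['\n'] ('\n' :: t) = true := by simp [List.isPrefixOf]
        rw [PySem.Chars.replace.go, if_pos hpre]
        rw [ih _ _ (show (List.drop ['\n'].length ('\n' :: t)).length ≤ f by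
          simp only [List.length_singleton, List.drop_succ_cons, List.drop_zero]; omega)]
        simp [pvR]
      · have hpre : List.isPrefixOf ['\n'] (c :: t) = false := by
          simp only [List.isPrefixOf, Bool.and_eq_false_iff, beq_eq_false_iff_ne, ne_eq]
          exact Or.inl fun h => hc h.symm
        rw [PySem.Chars.replace.go, if_neg (by simp [hpre])]
        rw [ih _ _ (by omega)]
        simp [pvR, hc]

theorem pv_replace_eq (p l : List Char) :
    PySem.Chars.replace l ['\n'] ('\n' :: p) = pvR p l := by
  rw [PySem.Chars.replace, if_neg (by simp)]
  simpa using pvGoR p l.length l [] (le_refl _)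

theorem pv_key (p : List Char) : ∀ l : List Char,
    PySem.Chars.join ['\n'] ((pvS l).map (p ++ ·)) = p ++ pvR p l := by
  intro l
  induction l with
  | nil => simp [pvS, pvR, PySem.Chars.join, List.intercalate]
  | cons c t ih =>
    by_cases hc : c = '\n'
    · subst hc
      simp only [pvS, pvR, reduceIte, List.map_cons]
      cases hs : pvS t with
      | nil => exact absurd hs (pvS_ne_nil t)
      | cons a b =>
        rw [hs] at ih
        simp only [List.append_nil, List.map_cons] at ih ⊢
        rw [PySem.Chars.join_cons_cons]
        rw [ih]
        simp
    · simp only [pvS, if_neg hc, pvR, if_neg hc]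
      cases hs : pvS t with
      | nil => exact absurd hs (pvS_ne_nil t)
      | cons a b =>
        rw [hs] at ih
        cases b with
        | nil =>
          simp only [List.map_cons, List.map_nil, PySem.Chars.join_singleton,
            List.modifyHead] at ih ⊢
          have : a = pvR p t := by
            have := ih
            exact List.append_cancel_left this
          simp [this]
        | cons b1 b2 =>
          simp only [List.modifyHead, List.map_cons] at ih ⊢
          rw [PySem.Chars.join_cons_cons] at ih ⊢
          simp only [List.append_assoc] at ih
          have ha := List.append_cancel_left ih
          rw [← ha]
          simp

-- ===== VERDICT (by name: the statement is the Claim_ definition above) =====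
theorem add_prefix_to_lines_spec : Claim_equal_add_prefix_to_lines := by
  intro s p _
  unfold Spec_add_prefix_to_lines add_prefix_to_lines add_prefix_to_lines_alt
  simp only [PySem.List.foldl_append_singleton_eq_map, pv_split_eq, pv_replace_eq,
    List.nil_append]
  rw [← pv_key]
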